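-- pv_equiv track=rewrite | github.com/Billio10/WakaAma | WakaAmaGamesV3.py | assign_points_from_lif
-- ===== SOURCE A (Python) =====
-- from collections import defaultdict
--
-- def assign_points_from_lif(lif_lines):
--     """
--     Extract club points from a .lif file.
--     Simplified: assign points based on placement for lines containing 'Final'.
--     """
--     place_points = {1: 8, 2: 7, 3: 6, 4: 5, 5: 4, 6: 3, 7: 2, 8: 1}
--     club_scores = defaultdict(int)
--
--     current_race = []
--     for line in lif_lines:
--         if "Final" in line:
--             if current_race:
--                 # Process previous race
--                 for race_line in current_race:
--                     parts = race_line.split(",")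
--                     if len(parts) > 5:
--                         try:
--                             place = int(parts[0])
--                             club = parts[5].strip()
--                             if club:
--                                 club_scores[club] += place_points.get(place, 1)
--                         except ValueError:
--                             continue
--             current_race = []
--         else:
--             current_race.append(line)
--     #Process last race
--     for race_line in current_race:
--         parts = race_line.split(",")
--         if len(parts) > 5:
--             try:
--                 place = int(parts[0])
--                 club = parts[5].strip()
--                 if club:
--                     club_scores[club] += place_points.get(place, 1)
--             except ValueError:
--                 continue
--     return club_scores
-- ===== SOURCE B (Python) =====
-- from collections import defaultdict
--
-- def assign_points_from_lif(lif_lines):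
--     """Aggregate club points from placement lines of a .lif file.
--
--     Staged design: a parse pass maps each line to an optional
--     (club, points) contribution, then a second pass sums the
--     contributions into the score table.
--     """
--     place_points = {1: 8, 2: 7, 3: 6, 4: 5, 5: 4, 6: 3, 7: 2, 8: 1}
--
--     def parse(line):
--         if "Final" in line:
--             return None
--         parts = line.split(",")
--         if len(parts) <= 5:
--             return None
--         try:
--             place = int(parts[0])
--         except ValueError:
--             return None
--         club = parts[5].strip()
--         if not club:
--             return None
--         return (club, place_points.get(place, 1))
--
--     contributions = [c for c in map(parse, lif_lines) if c is not None]
--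
--     club_scores = defaultdict(int)
--     for club, pts in contributions:
--         club_scores[club] += pts
--     return club_scores
-- ===== Notes on version B (the rewrite author's own statement) =====
-- stated objective: alternative
-- what changed: Replaced A's race buffer and its duplicated per-race scoring block with a staged pipeline: a pure parse pass producing optional (club, points) contributions, followed by a separate summation pass into the score table (the buffering never changed which lines are parsed or in what order).
import Mathlib
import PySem

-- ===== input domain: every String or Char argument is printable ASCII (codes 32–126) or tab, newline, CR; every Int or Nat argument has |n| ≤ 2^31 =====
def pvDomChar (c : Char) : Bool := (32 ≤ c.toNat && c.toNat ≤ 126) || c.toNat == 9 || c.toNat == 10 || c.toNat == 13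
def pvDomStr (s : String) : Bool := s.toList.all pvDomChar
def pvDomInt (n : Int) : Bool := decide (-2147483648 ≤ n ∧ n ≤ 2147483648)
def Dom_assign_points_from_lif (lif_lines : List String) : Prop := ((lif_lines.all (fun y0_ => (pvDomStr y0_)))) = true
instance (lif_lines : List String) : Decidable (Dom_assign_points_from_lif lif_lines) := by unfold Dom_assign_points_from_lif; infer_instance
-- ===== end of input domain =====

-- B replaces A's race buffer and duplicated per-race block with a staged pipeline
-- (parse each line to an optional (club, points) contribution, then sum them);
-- same result, since the buffering never affected which lines are parsed or in what order.

-- ===== PORT A =====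
-- place_points.get(place, 1)
def pvPlacePointsA (place : Int) : Int :=
  (PySem.Dict.ofList [((1:Int),(8:Int)),(2,7),(3,6),(4,5),(5,4),(6,3),(7,2),(8,1)]).getD place 1

-- the per-race-line processing body, written TWICE in A (per-race flush and trailing block)
def pvRaceLineA (d : PySem.Dict String Int) (race_line : String) : PySem.Dict String Int :=
  let parts := (PySem.Str.split? race_line ",").getD []   -- sep "," ≠ "": split? is always some here
  if parts.length > 5 then
    match PySem.Int.ofStr? (parts.getD 0 "") with         -- guarded by len > 5: index 0 in range
    | none => d                                           -- ValueError: continue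
    | some place =>
        let club := PySem.Str.strip (parts.getD 5 "")     -- guarded by len > 5: index 5 in range
        if club ≠ "" then d.modify club 0 (· + pvPlacePointsA place) else d
  else d

-- A's loop body: flush the buffer on a 'Final' line, otherwise append to it
def pvStepA (st : PySem.Dict String Int × List String) (line : String) :
    PySem.Dict String Int × List String :=
  if PySem.Str.isIn "Final" line then
    if st.2 ≠ [] then (st.2.foldl pvRaceLineA st.1, ([] : List String))
    else (st.1, [])
  else (st.1, st.2 ++ [line])

def assign_points_from_lif (lif_lines : List String) : List (String × Int) :=
  let st := lif_lines.foldl pvStepA (PySem.Dict.empty, [])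
  -- Process last race
  (st.2.foldl pvRaceLineA st.1).items

-- ===== PORT B =====
-- parse(line): optional (club, points) contribution of one line
def pvParseB (line : String) : Option (String × Int) :=
  if PySem.Str.isIn "Final" line then none
  else
    let parts := (PySem.Str.split? line ",").getD []      -- sep "," ≠ "": split? is always some here
    if parts.length ≤ 5 then none
    else
      match PySem.Int.ofStr? (parts.getD 0 "") with       -- guarded by len > 5: index 0 in range
      | none => none                                      -- ValueError
      | some place =>
          let club := PySem.Str.strip (parts.getD 5 "")   -- guarded by len > 5: index 5 in range
          if club = "" then none
          else some (club,
            (PySem.Dict.ofList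
              [((1:Int),(8:Int)),(2,7),(3,6),(4,5),(5,4),(6,3),(7,2),(8,1)]).getD place 1)

def assign_points_from_lif_alt (lif_lines : List String) : List (String × Int) :=
  let contributions := (lif_lines.map pvParseB).filterMap id
  (contributions.foldl (fun d cp => d.modify cp.1 0 (· + cp.2)) PySem.Dict.empty).items

-- ===== PRECONDITION & SPEC =====
def Spec_assign_points_from_lif (lif_lines : List String) (out : List (String × Int)) : Prop := out = assign_points_from_lif_alt lif_lines
instance (lif_lines : List String) (out : List (String × Int)) : Decidable (Spec_assign_points_from_lif lif_lines out) := by unfold Spec_assign_points_from_lif; infer_instance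

-- ===== CLAIM (what is proved, stated in full; the proofs are below) =====
def Claim_equal_assign_points_from_lif : Prop := ∀ (lif_lines : List String), Dom_assign_points_from_lif lif_lines → Spec_assign_points_from_lif lif_lines (assign_points_from_lif lif_lines)

-- ===== LEMMAS AND PROOFS =====

-- On a non-'Final' line, A's per-race-line body is a fold step over B's parse result.
theorem pvRaceLineA_parse (d : PySem.Dict String Int) (line : String)
    (h : ¬ PySem.Str.isIn "Final" line = true) :
    pvRaceLineA d line =
      match pvParseB line with
      | none => d
      | some cp => d.modify cp.1 0 (· + cp.2) := by
  unfold pvRaceLineA pvParseB pvPlacePointsA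
  rw [if_neg h]
  by_cases hlen : ((PySem.Str.split? line ",").getD []).length ≤ 5
  · simp [hlen, Nat.not_lt.mpr hlen]
  · simp only [Nat.lt_of_not_le hlen, if_pos, if_neg hlen]
    cases PySem.Int.ofStr? (((PySem.Str.split? line ",").getD []).getD 0 "") with
    | none => rfl
    | some place =>
        split_ifs <;> simp_all

-- A's folded state, finished by the trailing block, processes the buffer followed by
-- all remaining non-'Final' lines, in order.
theorem pvFoldA_invariant (ls : List String) (p : PySem.Dict String Int × List String) :
    (ls.foldl pvStepA p).2.foldl pvRaceLineA (ls.foldl pvStepA p).1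
    = (p.2 ++ ls.filter (fun l => ¬ PySem.Str.isIn "Final" l)).foldl pvRaceLineA p.1 := by
  induction ls generalizing p with
  | nil => simp
  | cons l ls ih =>
      by_cases h : PySem.Str.isIn "Final" l = true
      · by_cases hb : p.2 = []
        · rw [List.foldl_cons]
          simp at h
          simpa [pvStepA, h, hb] using ih (p.1, [])
        · rw [List.foldl_cons]
          simp at h
          simpa [pvStepA, h, hb, List.foldl_append] using ih (p.2.foldl pvRaceLineA p.1, [])
      · rw [List.foldl_cons]
        simp at h
        simpa [pvStepA, h, List.append_assoc] using ih (p.1, p.2 ++ [l])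

-- Folding A's per-race-line body over the non-'Final' lines is B's staged pipeline:
-- folding the summation step over the parsed contributions.
theorem pvFilter_eq_pipeline (ls : List String) (d : PySem.Dict String Int) :
    (ls.filter (fun l => ¬ PySem.Str.isIn "Final" l)).foldl pvRaceLineA d
    = ((ls.map pvParseB).filterMap id).foldl (fun d cp => d.modify cp.1 0 (· + cp.2)) d := by
  induction ls generalizing d with
  | nil => rfl
  | cons l ls ih =>
      by_cases h : PySem.Str.isIn "Final" l = true
      · have hp : pvParseB l = none := by unfold pvParseB; rw [if_pos h]
        have h1 : List.filter (fun l => decide (¬ PySem.Str.isIn "Final" l = true)) (l :: ls)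
            = List.filter (fun l => decide (¬ PySem.Str.isIn "Final" l = true)) ls := by
          rw [List.filter_cons]; simp only [h]; rfl
        have h2 : List.filterMap id (List.map pvParseB (l :: ls))
            = List.filterMap id (List.map pvParseB ls) := by
          rw [List.map_cons, List.filterMap_cons, hp]; rfl
        rw [h1, h2]; exact ih d
      · have hparse := pvRaceLineA_parse d l h
        rw [Bool.not_eq_true] at h
        have h1 : List.filter (fun l => decide (¬ PySem.Str.isIn "Final" l = true)) (l :: ls)
            = l :: List.filter (fun l => decide (¬ PySem.Str.isIn "Final" l = true)) ls := by
          rw [List.filter_cons]; simp only [h]; rfl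
        cases hp : pvParseB l with
        | none =>
            rw [hp] at hparse
            have h2 : List.filterMap id (List.map pvParseB (l :: ls))
                = List.filterMap id (List.map pvParseB ls) := by
              rw [List.map_cons, List.filterMap_cons, hp]; rfl
            rw [h1, h2, List.foldl_cons, hparse]; exact ih d
        | some cp =>
            rw [hp] at hparse
            have h2 : List.filterMap id (List.map pvParseB (l :: ls))
                = cp :: List.filterMap id (List.map pvParseB ls) := by
              rw [List.map_cons, List.filterMap_cons, hp]; rfl
            rw [h1, h2, List.foldl_cons, List.foldl_cons, hparse]; exact ih _

-- ===== VERDICT (by name: the statement is the Claim_ definition above) =====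
theorem assign_points_from_lif_spec : Claim_equal_assign_points_from_lif := by
  intro lif_lines _
  show _ = _
  unfold assign_points_from_lif assign_points_from_lif_alt
  simp only [← pvFilter_eq_pipeline]
  simpa using congrArg PySem.Dict.items
    (pvFoldA_invariant lif_lines (PySem.Dict.empty, []))
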